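-- pv_equiv track=rewrite | github.com/rayandabbagh/gate | backend/utils/debug_bundle.py | _generate_concise_summary
-- ===== SOURCE A (Python) =====
-- from typing import Dict, List, Any, Optional
--
-- def _generate_concise_summary(findings: List[Dict[str, Any]]) -> str:
--     """Generate concise summary of production bugs this commit might introduce"""
--     if not findings:
--         return "This commit was analyzed for production bugs. No bugs detected - appears safe for production."
--
--     critical = [f for f in findings if f.get("severity") == "high"]
--     medium = [f for f in findings if f.get("severity") == "medium"]
--     low = [f for f in findings if f.get("severity") == "low"]
--
--     summary = f"This commit might introduce {len(findings)} bug(s) in production: {len(critical)} critical, {len(medium)} medium, {len(low)} low.\n\n"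
--
--     # Show most critical bugs
--     if critical:
--         summary += "Critical bugs that WILL cause production failures:\n"
--         for finding in critical[:3]:  # Top 3 critical
--             summary += f"- {finding.get('description')} (File: {finding.get('file', 'unknown')})\n"
--         summary += "\n"
--
--     # Show medium bugs
--     if medium:
--         summary += "Medium risk bugs that MIGHT cause production issues:\n"
--         for finding in medium[:2]:  # Top 2 medium
--             summary += f"- {finding.get('description')} (File: {finding.get('file', 'unknown')})\n"
--         summary += "\n"
--
--     return summary.strip()
-- ===== SOURCE B (Python) =====
-- def _generate_concise_summary(findings):
--     """Generate concise summary of production bugs this commit might introduce"""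
--     if not findings:
--         return "This commit was analyzed for production bugs. No bugs detected - appears safe for production."
--
--     # One streaming pass: severity counts plus capped, already-formatted line buffers.
--     n_high = n_medium = n_low = 0
--     crit_lines = []
--     med_lines = []
--     for f in findings:
--         s = f.get("severity")
--         if s == "high":
--             n_high += 1
--             if len(crit_lines) < 3:
--                 crit_lines.append(f"- {f.get('description')} (File: {f.get('file', 'unknown')})")
--         elif s == "medium":
--             n_medium += 1
--             if len(med_lines) < 2:
--                 med_lines.append(f"- {f.get('description')} (File: {f.get('file', 'unknown')})")
--         elif s == "low":
--             n_low += 1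
--
--     parts = [
--         f"This commit might introduce {len(findings)} bug(s) in production: "
--         f"{n_high} critical, {n_medium} medium, {n_low} low."
--     ]
--     parts += (["Critical bugs that WILL cause production failures:\n" + "\n".join(crit_lines)]
--               if n_high else [])
--     parts += (["Medium risk bugs that MIGHT cause production issues:\n" + "\n".join(med_lines)]
--               if n_medium else [])
--     return "\n\n".join(parts)
-- ===== Notes on version B (the rewrite author's own statement) =====
-- stated objective: alternative
-- what changed: B replaces A's three severity-filter passes and post-hoc section loops (with trailing-whitespace strip) by ONE streaming pass that only keeps three counters and two cap-bounded buffers of already-formatted lines (at most 5 strings, never per-severity lists of findings), then joins header and non-empty sections with '\n\n'.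
import Mathlib
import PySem

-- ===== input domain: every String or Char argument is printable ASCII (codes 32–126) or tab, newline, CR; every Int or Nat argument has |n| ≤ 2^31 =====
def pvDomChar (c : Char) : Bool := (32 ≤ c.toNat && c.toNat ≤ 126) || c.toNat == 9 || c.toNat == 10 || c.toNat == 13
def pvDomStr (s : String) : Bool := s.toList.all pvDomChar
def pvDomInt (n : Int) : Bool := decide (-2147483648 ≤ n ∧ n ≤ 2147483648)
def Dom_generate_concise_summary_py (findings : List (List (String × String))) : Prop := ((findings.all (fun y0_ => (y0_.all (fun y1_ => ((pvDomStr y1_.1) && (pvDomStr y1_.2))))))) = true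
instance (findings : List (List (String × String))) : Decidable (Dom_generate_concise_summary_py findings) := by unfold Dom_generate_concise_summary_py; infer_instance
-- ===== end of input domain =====

-- B replaces A's three filter passes and section blocks by one streaming pass keeping only
-- severity counters and cap-bounded buffers of formatted lines (objective: alternative decomposition).

-- ===== PORT A =====
def lineA (f : List (String × String)) : String :=
  "- " ++ (match (PySem.Dict.mk f).get? "description" with | some s => s | none => "None")
       ++ " (File: " ++ (PySem.Dict.mk f).getD "file" "unknown" ++ ")\n"

def generate_concise_summary_py (findings : List (List (String × String))) : String :=
  if findings = [] then
    "This commit was analyzed for production bugs. No bugs detected - appears safe for production."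
  else
    let critical := findings.filter (fun f => (PySem.Dict.mk f).get? "severity" == some "high")
    let medium := findings.filter (fun f => (PySem.Dict.mk f).get? "severity" == some "medium")
    let low := findings.filter (fun f => (PySem.Dict.mk f).get? "severity" == some "low")
    let summary := "This commit might introduce " ++ PySem.Int.toStr (findings.length : Int)
      ++ " bug(s) in production: " ++ PySem.Int.toStr (critical.length : Int)
      ++ " critical, " ++ PySem.Int.toStr (medium.length : Int)
      ++ " medium, " ++ PySem.Int.toStr (low.length : Int) ++ " low." ++ "\n\n"
    let summary := if critical ≠ [] then
        ((critical.take 3).foldl (fun acc f => acc ++ lineA f)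
          (summary ++ "Critical bugs that WILL cause production failures:\n")) ++ "\n"
      else summary
    let summary := if medium ≠ [] then
        ((medium.take 2).foldl (fun acc f => acc ++ lineA f)
          (summary ++ "Medium risk bugs that MIGHT cause production issues:\n")) ++ "\n"
      else summary
    PySem.Str.strip summary

-- ===== PORT B =====
def lineB (f : List (String × String)) : String :=
  "- " ++ (match (PySem.Dict.mk f).get? "description" with | some s => s | none => "None")
       ++ " (File: " ++ (PySem.Dict.mk f).getD "file" "unknown" ++ ")"

-- scan state: (n_high, n_medium, n_low, crit_lines, med_lines)
def stepB (st : Nat × Nat × Nat × List String × List String) (f : List (String × String)) :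
    Nat × Nat × Nat × List String × List String :=
  let s := (PySem.Dict.mk f).get? "severity"
  if s == some "high" then
    (st.1 + 1, st.2.1, st.2.2.1,
     (if st.2.2.2.1.length < 3 then st.2.2.2.1 ++ [lineB f] else st.2.2.2.1), st.2.2.2.2)
  else if s == some "medium" then
    (st.1, st.2.1 + 1, st.2.2.1, st.2.2.2.1,
     (if st.2.2.2.2.length < 2 then st.2.2.2.2 ++ [lineB f] else st.2.2.2.2))
  else if s == some "low" then
    (st.1, st.2.1, st.2.2.1 + 1, st.2.2.2.1, st.2.2.2.2)
  else st

def generate_concise_summary_py_alt (findings : List (List (String × String))) : String :=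
  if findings = [] then
    "This commit was analyzed for production bugs. No bugs detected - appears safe for production."
  else
    let st := findings.foldl stepB (0, 0, 0, [], [])
    let head := "This commit might introduce " ++ PySem.Int.toStr (findings.length : Int)
      ++ " bug(s) in production: " ++ PySem.Int.toStr (st.1 : Int)
      ++ " critical, " ++ PySem.Int.toStr (st.2.1 : Int)
      ++ " medium, " ++ PySem.Int.toStr (st.2.2.1 : Int) ++ " low."
    let parts := [head]
      ++ (if st.1 ≠ 0 then
            ["Critical bugs that WILL cause production failures:\n" ++ PySem.Str.join "\n" st.2.2.2.1]
          else [])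
      ++ (if st.2.1 ≠ 0 then
            ["Medium risk bugs that MIGHT cause production issues:\n" ++ PySem.Str.join "\n" st.2.2.2.2]
          else [])
    PySem.Str.join "\n\n" parts

-- ===== PRECONDITION & SPEC =====
def Spec_generate_concise_summary_py (findings : List (List (String × String))) (out : String) : Prop := out = generate_concise_summary_py_alt findings
instance (findings : List (List (String × String))) (out : String) : Decidable (Spec_generate_concise_summary_py findings out) := by unfold Spec_generate_concise_summary_py; infer_instance

-- ===== CLAIM (what is proved, stated in full; the proofs are below) =====
def Claim_equal_generate_concise_summary_py : Prop := ∀ (findings : List (List (String × String))), Dom_generate_concise_summary_py findings → Spec_generate_concise_summary_py findings (generate_concise_summary_py findings)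

-- ===== LEMMAS AND PROOFS =====

lemma scan_fold (fs : List (List (String × String)))
    (nh nm nl : Nat) (cl ml : List String) :
    fs.foldl stepB (nh, nm, nl, cl, ml) =
      (nh + (fs.filter (fun f => (PySem.Dict.mk f).get? "severity" == some "high")).length,
       nm + (fs.filter (fun f => (PySem.Dict.mk f).get? "severity" == some "medium")).length,
       nl + (fs.filter (fun f => (PySem.Dict.mk f).get? "severity" == some "low")).length,
       cl ++ ((fs.filter (fun f => (PySem.Dict.mk f).get? "severity" == some "high")).take (3 - cl.length)).map lineB,
       ml ++ ((fs.filter (fun f => (PySem.Dict.mk f).get? "severity" == some "medium")).take (2 - ml.length)).map lineB) := by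
  induction fs generalizing nh nm nl cl ml with
  | nil => simp
  | cons f t ih =>
    rw [List.foldl_cons]
    by_cases c1 : (PySem.Dict.mk f).get? "severity" = some "high"
    · have c2 : ¬ (PySem.Dict.mk f).get? "severity" = some "medium" := by simp [c1]
      have c3 : ¬ (PySem.Dict.mk f).get? "severity" = some "low" := by simp [c1]
      rw [show stepB (nh, nm, nl, cl, ml) f =
          (nh + 1, nm, nl, (if cl.length < 3 then cl ++ [lineB f] else cl), ml) by
        simp [stepB, c1]]
      by_cases hlen : cl.length < 3
      · rw [if_pos hlen, ih]
        simp only [List.filter_cons, c1, c2, c3]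
        have h3 : 3 - cl.length = (3 - (cl ++ [lineB f]).length) + 1 := by simp; omega
        rw [h3]
        simp [List.take_succ_cons]
        omega
      · rw [if_neg hlen, ih]
        simp only [List.filter_cons, c1, c2, c3]
        have h0 : 3 - cl.length = 0 := by omega
        simp [h0]
        omega
    · by_cases c2 : (PySem.Dict.mk f).get? "severity" = some "medium"
      · have c3 : ¬ (PySem.Dict.mk f).get? "severity" = some "low" := by simp [c2]
        rw [show stepB (nh, nm, nl, cl, ml) f =
            (nh, nm + 1, nl, cl, (if ml.length < 2 then ml ++ [lineB f] else ml)) by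
          simp [stepB, c1, c2]]
        by_cases hlen : ml.length < 2
        · rw [if_pos hlen, ih]
          simp only [List.filter_cons, c1, c2, c3]
          have h2 : 2 - ml.length = (2 - (ml ++ [lineB f]).length) + 1 := by simp; omega
          rw [h2]
          simp [List.take_succ_cons, c1]
          omega
        · rw [if_neg hlen, ih]
          simp only [List.filter_cons, c1, c2, c3]
          have h0 : 2 - ml.length = 0 := by omega
          simp [h0, c1]
          omega
      · by_cases c3 : (PySem.Dict.mk f).get? "severity" = some "low"
        · rw [show stepB (nh, nm, nl, cl, ml) f = (nh, nm, nl + 1, cl, ml) by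
            simp [stepB, c1, c2, c3]]
          rw [ih]
          simp only [List.filter_cons, c1, c2, c3]
          simp [c1, c2]
          omega
        · rw [show stepB (nh, nm, nl, cl, ml) f = (nh, nm, nl, cl, ml) by
            simp [stepB, c1, c2, c3]]
          rw [ih]
          simp only [List.filter_cons]
          simp [c1, c2, c3]

def EndsNW (xs : List Char) : Prop := ∃ ys c, xs = ys ++ [c] ∧ PySem.Chars.isspace c = false

lemma endsNW_append (zs : List Char) {xs : List Char} (h : EndsNW xs) : EndsNW (zs ++ xs) := by
  obtain ⟨ys, c, rfl, hc⟩ := h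
  exact ⟨zs ++ ys, c, by simp, hc⟩

lemma rstrip_of_endsNW {xs : List Char} (h : EndsNW xs) : PySem.Chars.rstrip xs = xs := by
  obtain ⟨ys, c, rfl, hc⟩ := h
  simp [PySem.Chars.rstrip, hc]

lemma rstrip_strip_ws {xs ws : List Char} (h : EndsNW xs) (hws : ws.all PySem.Chars.isspace) :
    PySem.Chars.rstrip (xs ++ ws) = xs := by
  have h1 : List.dropWhile PySem.Chars.isspace ws.reverse = [] := by
    rw [List.dropWhile_eq_nil_iff]
    intro x hx
    exact List.all_eq_true.mp hws x (List.mem_reverse.mp hx)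
  have : PySem.Chars.rstrip (xs ++ ws) = PySem.Chars.rstrip xs := by
    simp [PySem.Chars.rstrip, List.dropWhile_append, h1]
  rw [this, rstrip_of_endsNW h]

lemma lstrip_cons {c : Char} {xs : List Char} (hc : PySem.Chars.isspace c = false) :
    PySem.Chars.lstrip (c :: xs) = c :: xs := by
  simp [PySem.Chars.lstrip, List.dropWhile, hc]

lemma intercalate_cons₂ {α : Type} (s a b : List α) (t : List (List α)) :
    List.intercalate s (a :: b :: t) = a ++ s ++ List.intercalate s (b :: t) := by
  simp [List.intercalate, List.intersperse]

-- flatten of newline-terminated lines = intercalate ++ newline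
lemma flatten_lines {α : Type} (g : α → List Char) (x : α) (t : List α) :
    (List.map (fun f => g f ++ ['\n']) (x :: t)).flatten =
      List.intercalate ['\n'] (List.map g (x :: t)) ++ ['\n'] := by
  induction t generalizing x with
  | nil => simp [List.intercalate]
  | cons y t ih =>
    have := ih y
    simp only [List.map_cons, List.flatten_cons] at this ⊢
    rw [this]
    rw [intercalate_cons₂]
    simp

lemma strip_T {xs ws : List Char} (h : EndsNW xs) (hws : ws.all PySem.Chars.isspace) (hx : xs.head? = some 'T') :
    PySem.Chars.strip (xs ++ ws) = xs := by
  cases xs with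
  | nil => simp at hx
  | cons c r =>
    simp only [List.head?_cons, Option.some.injEq] at hx
    subst hx
    simp only [PySem.Chars.strip, List.cons_append,
      lstrip_cons (by decide : PySem.Chars.isspace 'T' = false)]
    rw [← List.cons_append, rstrip_strip_ws h hws]

lemma lineA_eq (f : List (String × String)) : (lineA f).toList = (lineB f).toList ++ ['\n'] := by
  simp [lineA, lineB]

lemma endsNW_lineB (f : List (String × String)) : EndsNW ((lineB f).toList) := by
  refine ⟨(("- " ++ (match (PySem.Dict.mk f).get? "description" with | some s => s | none => "None")
      ++ " (File: " ++ (PySem.Dict.mk f).getD "file" "unknown")).toList, ')', ?_, by decide⟩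
  simp [lineB]

lemma endsNW_intercalate {α : Type} (g : α → List Char) (hg : ∀ f, EndsNW (g f)) (x : α) (t : List α) :
    EndsNW (List.intercalate ['\n'] (List.map g (x :: t))) := by
  induction t generalizing x with
  | nil => simpa [List.intercalate] using hg x
  | cons y t ih =>
    rw [List.map_cons, List.map_cons, intercalate_cons₂]
    have h2 := ih y
    rw [List.map_cons] at h2
    exact endsNW_append _ h2

lemma foldl_lineA_toList (xs : List (List (String × String))) (init : String) :
    (xs.foldl (fun acc f => acc ++ lineA f) init).toList
      = init.toList ++ (xs.map (fun f => (lineB f).toList ++ ['\n'])).flatten := by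
  induction xs generalizing init with
  | nil => simp
  | cons x t ih => rw [List.foldl_cons, ih]; simp [lineA_eq]

lemma main_eq (findings : List (List (String × String))) :
    generate_concise_summary_py findings = generate_concise_summary_py_alt findings := by
  by_cases hnil : findings = []
  · subst hnil; rfl
  · unfold generate_concise_summary_py generate_concise_summary_py_alt
    rw [if_neg hnil, if_neg hnil, scan_fold]
    simp only [Nat.zero_add, List.nil_append, List.append_nil, Nat.sub_zero, List.length_nil]
    set C := findings.filter (fun f => (PySem.Dict.mk f).get? "severity" == some "high") with hCdef
    set M := findings.filter (fun f => (PySem.Dict.mk f).get? "severity" == some "medium") with hMdef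
    set L := findings.filter (fun f => (PySem.Dict.mk f).get? "severity" == some "low") with hLdef
    set hd := "This commit might introduce " ++ PySem.Int.toStr (findings.length : Int)
      ++ " bug(s) in production: " ++ PySem.Int.toStr (C.length : Int)
      ++ " critical, " ++ PySem.Int.toStr (M.length : Int)
      ++ " medium, " ++ PySem.Int.toStr (L.length : Int) ++ " low." with hhddef
    have hhd : hd.toList.head? = some 'T' := by rw [hhddef]; simp
    have hend : EndsNW hd.toList := by
      rw [hhddef]
      refine ⟨("This commit might introduce " ++ PySem.Int.toStr (findings.length : Int)
        ++ " bug(s) in production: " ++ PySem.Int.toStr (C.length : Int)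
        ++ " critical, " ++ PySem.Int.toStr (M.length : Int)
        ++ " medium, " ++ PySem.Int.toStr (L.length : Int)).toList ++ [' ', 'l', 'o', 'w'], '.', by simp, by decide⟩
    clear_value C M L hd
    clear hCdef hMdef hLdef hhddef
    by_cases hC : C = [] <;> by_cases hM : M = []
    · -- no critical, no medium
      rw [if_neg (not_not_intro hM), if_neg (not_not_intro hC)]
      rw [if_neg (by simp [hC]), if_neg (by simp [hM])]
      have h1 : (hd ++ "\n\n").toList = hd.toList ++ ['\n', '\n'] := by simp
      simp only [PySem.Str.strip, PySem.Str.join]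
      rw [h1, strip_T (ws := ['\n','\n']) hend (by decide) hhd]
      simp [PySem.Chars.join, List.intercalate]
    · -- medium only
      rw [if_pos hM, if_neg (not_not_intro hC)]
      rw [if_neg (by simp [hC]), if_pos (by simp [hM])]
      obtain ⟨m0, mt, rfl⟩ := List.exists_cons_of_ne_nil hM
      simp only [PySem.Str.strip, PySem.Str.join]
      have hX : ((List.foldl (fun acc f => acc ++ lineA f)
            ((hd ++ "\n\n") ++ "Medium risk bugs that MIGHT cause production issues:\n") (List.take 2 (m0 :: mt))) ++ "\n").toList
          = (hd.toList ++ ("\n\n" ++ "Medium risk bugs that MIGHT cause production issues:" ++ "\n").toList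
              ++ List.intercalate ['\n'] (List.map (fun f => (lineB f).toList) (m0 :: mt.take 1))) ++ ['\n','\n'] := by
        rw [show List.take 2 (m0::mt) = m0 :: mt.take 1 from rfl]
        simp only [String.toList_append]
        rw [foldl_lineA_toList, flatten_lines]
        simp
      rw [hX, strip_T (ws := ['\n','\n'])
        (endsNW_append _ (endsNW_intercalate _ (fun f => endsNW_lineB f) m0 (mt.take 1)))
        (by decide) (by simp [List.head?_append, hhd])]
      refine congrArg String.ofList ?_
      simp [PySem.Chars.join, List.intercalate, List.intersperse, Function.comp_def]
    · -- critical only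
      rw [if_neg (not_not_intro hM), if_pos hC]
      rw [if_pos (by simp [hC]), if_neg (by simp [hM])]
      obtain ⟨c0, ct, rfl⟩ := List.exists_cons_of_ne_nil hC
      simp only [PySem.Str.strip, PySem.Str.join]
      have hX : ((List.foldl (fun acc f => acc ++ lineA f)
            (hd ++ "\n\n" ++ "Critical bugs that WILL cause production failures:\n") (List.take 3 (c0 :: ct))) ++ "\n").toList
          = (hd.toList ++ ("\n\n" ++ "Critical bugs that WILL cause production failures:" ++ "\n").toList
              ++ List.intercalate ['\n'] (List.map (fun f => (lineB f).toList) (c0 :: ct.take 2))) ++ ['\n','\n'] := by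
        rw [show List.take 3 (c0::ct) = c0 :: ct.take 2 from rfl]
        simp only [String.toList_append]
        rw [foldl_lineA_toList, flatten_lines]
        simp
      rw [hX, strip_T (ws := ['\n','\n'])
        (endsNW_append _ (endsNW_intercalate _ (fun f => endsNW_lineB f) c0 (ct.take 2)))
        (by decide) (by simp [List.head?_append, hhd])]
      refine congrArg String.ofList ?_
      simp [PySem.Chars.join, List.intercalate, List.intersperse, Function.comp_def]
    · -- both sections
      rw [if_pos hM, if_pos hC]
      rw [if_pos (by simp [hC]), if_pos (by simp [hM])]
      obtain ⟨c0, ct, rfl⟩ := List.exists_cons_of_ne_nil hC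
      obtain ⟨m0, mt, rfl⟩ := List.exists_cons_of_ne_nil hM
      simp only [PySem.Str.strip, PySem.Str.join]
      have hX : ((List.foldl (fun acc f => acc ++ lineA f)
            (((List.foldl (fun acc f => acc ++ lineA f)
                (hd ++ "\n\n" ++ "Critical bugs that WILL cause production failures:\n") (List.take 3 (c0 :: ct))) ++ "\n")
              ++ "Medium risk bugs that MIGHT cause production issues:\n") (List.take 2 (m0 :: mt))) ++ "\n").toList
          = (hd.toList ++ ("\n\n" ++ "Critical bugs that WILL cause production failures:" ++ "\n").toList
              ++ (List.intercalate ['\n'] (List.map (fun f => (lineB f).toList) (c0 :: ct.take 2))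
                ++ ("\n" ++ "\n" ++ "Medium risk bugs that MIGHT cause production issues:" ++ "\n").toList
                ++ List.intercalate ['\n'] (List.map (fun f => (lineB f).toList) (m0 :: mt.take 1)))) ++ ['\n','\n'] := by
        rw [show List.take 3 (c0::ct) = c0 :: ct.take 2 from rfl,
            show List.take 2 (m0::mt) = m0 :: mt.take 1 from rfl]
        simp only [String.toList_append]
        rw [foldl_lineA_toList]
        simp only [String.toList_append]
        rw [foldl_lineA_toList, flatten_lines, flatten_lines]
        simp
      rw [hX, strip_T (ws := ['\n','\n'])
        (endsNW_append _ (endsNW_append _ (endsNW_intercalate _ (fun f => endsNW_lineB f) m0 (mt.take 1))))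
        (by decide) (by simp [List.head?_append, hhd])]
      refine congrArg String.ofList ?_
      simp [PySem.Chars.join, List.intercalate, List.intersperse, Function.comp_def]

-- ===== VERDICT (by name: the statement is the Claim_ definition above) =====
theorem generate_concise_summary_py_spec : Claim_equal_generate_concise_summary_py := by
  intro findings _
  exact main_eq findings
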